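-- pv_equiv track=rewrite | github.com/olsch88/DucksandDragons | quest9.py | solve_part3
-- ===== SOURCE A (Python) =====
-- from itertools import permutations
-- from collections import deque
--
-- def is_child(child_candidate: str, parent1: str, parent2: str) -> bool:
--     for genes in zip(child_candidate, parent1, parent2):
--         if genes[0] not in genes[1:]:
--             return False
--
--     return True
--
-- def get_family(related: dict[int, set[int]], start: int) -> set[int]:
--     found = set()
--     current = start
--     queue = deque()
--     found.add(start)
--     queue.append(current)
--     while len(queue) != 0:
--         current = queue.popleft()
--         for element in related[current]:
--             if element not in found:
--                 found.add(element)
--                 queue.append(element)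
--     return found
--
-- def solve_part3(gene_sequences: list[tuple[int, str]]) -> int:
--     perms = permutations(gene_sequences, 3)
--     related: dict[int, set[int]] = dict()
--     for i in range(1, len(gene_sequences) + 1):
--         related[i] = set((i,))
--     for per in perms:
--         if is_child(per[0][1], per[1][1], per[2][1]):
--             related[per[0][0]].add(per[1][0])
--             related[per[0][0]].add(per[2][0])
--
--             related[per[1][0]].add(per[0][0])
--             related[per[1][0]].add(per[2][0])
--
--             related[per[2][0]].add(per[0][0])
--             related[per[2][0]].add(per[1][0])
--
--     len_largest = 0
--     largest = set()
--     checked = set()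
--     for i in range(1, len(gene_sequences) + 1):
--         if i in checked:
--             continue
--         checked.add(i)
--
--         current_family = get_family(related, i)
--
--         current_family_length = len(current_family)
--         checked.update(current_family)
--         if current_family_length > len_largest:
--             len_largest = current_family_length
--             largest = current_family
--
--     return sum(largest)
-- ===== SOURCE B (Python) =====
-- from itertools import permutations
--
--
-- def solve_part3(gene_sequences: list[tuple[int, str]]) -> int:
--     n = len(gene_sequences)
--     # component label for each id 0..n; merging = wholesale relabelling
--     label = list(range(n + 1))
--     for (ida, sa), (idb, sb), (idc, sc) in permutations(gene_sequences, 3):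
--         if all(g == p or g == q for g, (p, q) in zip(sa, zip(sb, sc))):
--             for other in (idb, idc):
--                 x, y = label[ida], label[other]
--                 if x != y:
--                     label = [y if c == x else c for c in label]
--     best_size = 0
--     best_sum = 0
--     for v in range(1, n + 1):
--         lv = label[v]
--         sz = sum(1 if label[w] == lv else 0 for w in range(1, n + 1))
--         if sz > best_size:
--             best_size = sz
--             best_sum = sum(w for w in range(1, n + 1) if label[w] == lv)
--     return best_sum
-- ===== Notes on version B (the rewrite author's own statement) =====
-- stated objective: alternative
-- what changed: Keeps the O(n^3) scan over permutations and the child test, but replaces the adjacency dict-of-sets plus BFS per component by a merge-by-relabelling label array (union-find with eager relabelling), and replaces A's checked-set component walk by a direct scan that scores each id's label class, relying on strict '>' so repeats of a class never win.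
import Mathlib
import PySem

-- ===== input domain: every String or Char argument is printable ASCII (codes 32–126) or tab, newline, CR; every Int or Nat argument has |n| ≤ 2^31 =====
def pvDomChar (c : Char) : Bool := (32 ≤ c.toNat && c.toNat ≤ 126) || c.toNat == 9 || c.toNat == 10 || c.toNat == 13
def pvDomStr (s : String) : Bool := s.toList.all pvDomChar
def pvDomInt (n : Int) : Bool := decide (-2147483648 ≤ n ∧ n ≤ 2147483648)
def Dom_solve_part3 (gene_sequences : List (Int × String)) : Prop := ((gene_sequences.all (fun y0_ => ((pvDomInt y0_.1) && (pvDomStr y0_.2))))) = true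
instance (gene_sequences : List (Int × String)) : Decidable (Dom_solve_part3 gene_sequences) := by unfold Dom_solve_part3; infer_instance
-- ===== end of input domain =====

-- B replaces A's adjacency dict-of-sets + BFS by a merge-by-relabelling label array and a
-- label-class scoring scan (objective: alternative; same asymptotic cost).

-- ===== PORT A =====

-- is_child: loop over zip(child, parent1, parent2), reject when genes[0] not in genes[1:]
def pvIsChildAux : List Char → List Char → List Char → Bool
  | g0 :: cs, g1 :: ps, g2 :: qs =>
      if g0 = g1 ∨ g0 = g2 then pvIsChildAux cs ps qs else false
  | _, _, _ => true

def pvIsChild (child_candidate parent1 parent2 : String) : Bool :=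
  pvIsChildAux child_candidate.toList parent1.toList parent2.toList

-- get_family's while loop; fuel = related.size + 1 pops suffice (proved below under Pre_)
def pvGetFamilyLoop (related : PySem.Dict Int (PySem.Set Int)) :
    Nat → PySem.Set Int → List Int → PySem.Set Int
  | 0, found, _ => found
  | _ + 1, found, [] => found
  | fuel + 1, found, current :: rest =>
      let st := (related.getD current PySem.Set.empty).foldl
        (fun (st : PySem.Set Int × List Int) e =>
          if st.1.contains e then st else (st.1.add e, st.2 ++ [e])) (found, [])
      pvGetFamilyLoop related fuel st.1 (rest ++ st.2)

def pvGetFamily (related : PySem.Dict Int (PySem.Set Int)) (start : Int) : PySem.Set Int :=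
  pvGetFamilyLoop related (related.size + 1) (PySem.Set.add PySem.Set.empty start) [start]

-- body of 'for per in perms: if is_child(...): related[...].add(...) × 6'
-- (related[x].add(y) is Dict.modify; exact under Pre_, where every id is a key)
def pvStepA (d : PySem.Dict Int (PySem.Set Int)) (per : List (Int × String)) :
    PySem.Dict Int (PySem.Set Int) :=
  let p0 := PySem.List.pyGetD per 0 (0, "")
  let p1 := PySem.List.pyGetD per 1 (0, "")
  let p2 := PySem.List.pyGetD per 2 (0, "")
  if pvIsChild p0.2 p1.2 p2.2 then
    (((((d.modify p0.1 PySem.Set.empty (fun s => s.add p1.1)).modify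
        p0.1 PySem.Set.empty (fun s => s.add p2.1)).modify
        p1.1 PySem.Set.empty (fun s => s.add p0.1)).modify
        p1.1 PySem.Set.empty (fun s => s.add p2.1)).modify
        p2.1 PySem.Set.empty (fun s => s.add p0.1)).modify
        p2.1 PySem.Set.empty (fun s => s.add p1.1)
  else d

def solve_part3 (gene_sequences : List (Int × String)) : Int :=
  let n := gene_sequences.length
  let related0 := (PySem.List.pyRange 1 ((n : Int) + 1)).foldl
    (fun d i => d.insert i (PySem.Set.ofList [i])) PySem.Dict.empty
  let related := (PySem.List.permutations gene_sequences 3).foldl pvStepA related0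
  let fin := (PySem.List.pyRange 1 ((n : Int) + 1)).foldl
    (fun (st : Int × PySem.Set Int × PySem.Set Int) i =>
      if st.2.2.contains i then st
      else
        let checked := st.2.2.add i
        let fam := pvGetFamily related i
        let famLen : Int := PySem.Set.len fam
        let checked2 := checked.update fam
        if famLen > st.1 then (famLen, fam, checked2) else (st.1, st.2.1, checked2))
    (0, PySem.Set.empty, PySem.Set.empty)
  fin.2.1.sum

-- ===== PORT B =====

-- all(g == p or g == q for g, (p, q) in zip(sa, zip(sb, sc)))
def pvIsChild2 (sa sb sc : String) : Bool :=
  (sa.toList.zip (sb.toList.zip sc.toList)).all (fun t => t.1 == t.2.1 || t.1 == t.2.2)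

-- x, y = label[ida], label[other]; if x != y: label = [y if c == x else c for c in label]
def pvUnion (label : List Int) (u v : Int) : List Int :=
  let x := PySem.List.pyGetD label u 0
  let y := PySem.List.pyGetD label v 0
  if x ≠ y then label.map (fun c => if c = x then y else c) else label

def pvStepB (lab : List Int) (per : List (Int × String)) : List Int :=
  match per with
  | [a, b, c] =>
      if pvIsChild2 a.2 b.2 c.2 then pvUnion (pvUnion lab a.1 b.1) a.1 c.1 else lab
  | _ => lab  -- unreachable: every member of permutations xs 3 has length 3

def solve_part3_alt (gene_sequences : List (Int × String)) : Int :=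
  let n := gene_sequences.length
  let label := (PySem.List.permutations gene_sequences 3).foldl pvStepB
    ((List.range (n + 1)).map Int.ofNat)
  let fin := (PySem.List.pyRange 1 ((n : Int) + 1)).foldl
    (fun (st : Int × Int) v =>
      let lv := PySem.List.pyGetD label v 0
      let sz : Int := ((PySem.List.pyRange 1 ((n : Int) + 1)).map
        (fun w => if PySem.List.pyGetD label w 0 = lv then (1 : Int) else 0)).sum
      if sz > st.1 then
        (sz, ((PySem.List.pyRange 1 ((n : Int) + 1)).filter
          (fun w => PySem.List.pyGetD label w 0 = lv)).sum)
      else st)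
    (0, 0)
  fin.2

-- ===== PRECONDITION & SPEC =====
-- Pre_ is exactly A's return domain: A's dict is keyed by 1..len, so whenever an ordered
-- triple of distinct rows passes the child test, all three of its ids must lie in 1..len
-- (ids of rows never in a passing triple are unconstrained); otherwise A's related[id]
-- raises KeyError.
def pvTripleOk (n : Int) (p : List (Int × String)) : Bool :=
  match p with
  | [a, b, c] =>
      !((a.2.toList.zip (b.2.toList.zip c.2.toList)).all
        (fun t => t.1 == t.2.1 || t.1 == t.2.2))
      || p.all (fun q => decide (1 ≤ q.1 ∧ q.1 ≤ n))
  | _ => true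

def Pre_solve_part3 (gene_sequences : List (Int × String)) : Prop :=
  ∀ p ∈ PySem.List.permutations gene_sequences 3,
    pvTripleOk (gene_sequences.length : Int) p = true
instance (gene_sequences : List (Int × String)) : Decidable (Pre_solve_part3 gene_sequences) := by
  unfold Pre_solve_part3; infer_instance

def pvWitness_solve_part3 : (List (Int × String)) := [(2, "ab"), (1, "aa"), (3, "bb")]

def Spec_solve_part3 (gene_sequences : List (Int × String)) (out : Int) : Prop :=
  out = solve_part3_alt gene_sequences
instance (gene_sequences : List (Int × String)) (out : Int) :
    Decidable (Spec_solve_part3 gene_sequences out) := by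
  unfold Spec_solve_part3; infer_instance

-- ===== CLAIM (what is proved, stated in full; the proofs are below) =====
def Claim_equal_solve_part3 : Prop := ∀ (gene_sequences : List (Int × String)), Dom_solve_part3 gene_sequences → Pre_solve_part3 gene_sequences → Spec_solve_part3 gene_sequences (solve_part3 gene_sequences)

-- ===== LEMMAS AND PROOFS =====

-- the id universe 1..n
def pvIds (xs : List (Int × String)) : List Int :=
  PySem.List.pyRange 1 ((xs.length : Int) + 1)

-- 'x and y both appear among the ids of a matched triple of ps'
def pvRelL (ps : List (List (Int × String))) (x y : Int) : Prop :=
  ∃ a b c, [a, b, c] ∈ ps ∧ pvIsChild a.2 b.2 c.2 = true ∧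
    (x = a.1 ∨ x = b.1 ∨ x = c.1) ∧ (y = a.1 ∨ y = b.1 ∨ y = c.1)

def pvRel (xs : List (Int × String)) (x y : Int) : Prop :=
  pvRelL (PySem.List.permutations xs 3) x y

def pvConn (xs : List (Int × String)) : Int → Int → Prop :=
  Relation.ReflTransGen (pvRel xs)

def pvLabf (lab : List Int) (v : Int) : Int := PySem.List.pyGetD lab v 0

-- ---- basic facts about the id universe ----

theorem pvIds_eq_map (xs : List (Int × String)) :
    pvIds xs = List.map (fun k : Nat => (1 + k : Int)) (List.range xs.length) := by
  unfold pvIds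
  rw [PySem.List.pyRange_of_pos _ _ (by norm_num : (0 : Int) < 1)]
  have h : (if (1 : Int) < (xs.length : Int) + 1
      then (((xs.length : Int) + 1 - 1 + 1 - 1) / 1).toNat else 0) = xs.length := by
    split <;> omega
  rw [h]
  simp

theorem mem_pvIds (xs : List (Int × String)) (x : Int) :
    x ∈ pvIds xs ↔ 1 ≤ x ∧ x ≤ (xs.length : Int) := by
  unfold pvIds
  rw [PySem.List.mem_pyRange_one]
  omega

theorem nodup_pvIds (xs : List (Int × String)) : (pvIds xs).Nodup := by
  rw [pvIds_eq_map]
  exact List.Nodup.map (fun a b h => by omega) (List.nodup_range)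

theorem length_pvIds (xs : List (Int × String)) : (pvIds xs).length = xs.length := by
  rw [pvIds_eq_map]; simp

-- ---- permutations facts ----

theorem length_of_mem_permutations {α : Type} :
    ∀ (r : Nat) (xs p : List α), p ∈ PySem.List.permutations xs r → p.length = r := by
  intro r
  induction r with
  | zero => intro xs p hp; simp [PySem.List.permutations] at hp; simp [hp]
  | succ r ih =>
      intro xs p hp
      rw [PySem.List.permutations] at hp
      simp only [List.mem_flatMap, List.mem_range] at hp
      obtain ⟨i, hi, hmem⟩ := hp
      rcases h : xs[i]? with _ | x
      · rw [h] at hmem; simp at hmem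
      · rw [h] at hmem
        simp only [List.mem_map] at hmem
        obtain ⟨q, hq, rfl⟩ := hmem
        simp [ih _ _ hq]

theorem shape_of_mem_permutations3 {α : Type} (xs : List α) (p : List α)
    (hp : p ∈ PySem.List.permutations xs 3) : ∃ a b c, p = [a, b, c] := by
  have h := length_of_mem_permutations 3 xs p hp
  match p, h with
  | [a, b, c], _ => exact ⟨a, b, c, rfl⟩

-- ---- the two child tests agree ----

theorem isChildAux_eq (cs : List Char) : ∀ (ps qs : List Char),
    pvIsChildAux cs ps qs = (cs.zip (ps.zip qs)).all (fun t => t.1 == t.2.1 || t.1 == t.2.2) := by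
  induction cs with
  | nil => intro ps qs; simp [pvIsChildAux]
  | cons g cs ih =>
      intro ps qs
      match ps, qs with
      | [], _ => simp [pvIsChildAux]
      | _ :: _, [] => simp [pvIsChildAux]
      | p :: ps, q :: qs =>
          simp only [pvIsChildAux, List.zip_cons_cons, List.all_cons, ih]
          by_cases h : g = p ∨ g = q
          · have hb : (g == p || g == q) = true := by
              rcases h with h | h <;> simp [h]
            simp [h, hb]
          · have h1 : ¬ g = p := fun hh => h (Or.inl hh)
            have h2 : ¬ g = q := fun hh => h (Or.inr hh)
            simp [h, h1, h2]

theorem isChild2_eq (sa sb sc : String) : pvIsChild2 sa sb sc = pvIsChild sa sb sc := by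
  unfold pvIsChild2 pvIsChild
  rw [isChildAux_eq]

-- from Pre_: a matched triple has all three ids in 1..n
theorem pv_pre_ids (xs : List (Int × String)) (hpre : Pre_solve_part3 xs)
    {a b c : Int × String} (hm : [a, b, c] ∈ PySem.List.permutations xs 3)
    (hch : pvIsChild a.2 b.2 c.2 = true) :
    a.1 ∈ pvIds xs ∧ b.1 ∈ pvIds xs ∧ c.1 ∈ pvIds xs := by
  have h := hpre _ hm
  have hch2 : pvIsChild2 a.2 b.2 c.2 = true := by rw [isChild2_eq]; exact hch
  have hch3 : ((a.2.toList.zip (b.2.toList.zip c.2.toList)).all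
      (fun t => t.1 == t.2.1 || t.1 == t.2.2)) = true := hch2
  rw [show pvTripleOk (xs.length : Int) [a, b, c] =
      (!((a.2.toList.zip (b.2.toList.zip c.2.toList)).all
        (fun t => t.1 == t.2.1 || t.1 == t.2.2))
      || [a, b, c].all (fun q => decide (1 ≤ q.1 ∧ q.1 ≤ (xs.length : Int)))) from rfl,
    hch3] at h
  simp only [Bool.not_true, Bool.false_or, List.all_cons, List.all_nil,
    Bool.and_true, Bool.and_eq_true, decide_eq_true_eq] at h
  exact ⟨(mem_pvIds xs _).mpr h.1, (mem_pvIds xs _).mpr h.2.1, (mem_pvIds xs _).mpr h.2.2⟩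

-- ---- A's related dict: initialisation and the six add-modifies ----

theorem pv_mem_getD_modify_add (d : PySem.Dict Int (PySem.Set Int)) (k z x y : Int) :
    (y ∈ (d.modify k PySem.Set.empty (fun s => s.add z)).getD x PySem.Set.empty) ↔
      (y ∈ d.getD x PySem.Set.empty ∨ (x = k ∧ y = z)) := by
  rw [PySem.Dict.getD_modify]
  by_cases hx : x = k
  · subst hx; simp [PySem.Set.mem_add]
  · simp [hx]

theorem pv_nodup_getD_modify_add (d : PySem.Dict Int (PySem.Set Int)) (k z : Int)
    (h : ∀ x, (d.getD x PySem.Set.empty).Nodup) (x : Int) :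
    ((d.modify k PySem.Set.empty (fun s => s.add z)).getD x PySem.Set.empty).Nodup := by
  rw [PySem.Dict.getD_modify]
  by_cases hx : x = k
  · subst hx; simp only [if_pos rfl]
    exact PySem.Set.nodup_add _ _ (h x)
  · simp only [if_neg hx]
    exact h x

theorem pv_keys_modify_add (d : PySem.Dict Int (PySem.Set Int)) (k z : Int)
    (hk : k ∈ d.keys) :
    (d.modify k PySem.Set.empty (fun s => s.add z)).keys = d.keys := by
  rw [PySem.Dict.keys_modify, PySem.Dict.keys_insert_of_contains]
  exact (PySem.Dict.contains_iff_mem_keys _ _).mpr hk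

theorem pv_getD_init : ∀ (l : List Int) (d : PySem.Dict Int (PySem.Set Int)) (x : Int),
    ((l.foldl (fun d i => d.insert i (PySem.Set.ofList [i])) d).getD x PySem.Set.empty)
      = if x ∈ l then [x] else d.getD x PySem.Set.empty := by
  intro l
  induction l with
  | nil => intro d x; simp
  | cons e t ih =>
      intro d x
      rw [List.foldl_cons, ih]
      by_cases hxt : x ∈ t
      · simp [hxt]
      · by_cases hxe : x = e
        · subst hxe
          simp [hxt, PySem.Dict.getD_insert]
          rfl
        · simp [hxt, hxe, PySem.Dict.getD_insert]

theorem pv_keys_init (xs : List (Int × String)) :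
    ((pvIds xs).foldl (fun d i => d.insert i (PySem.Set.ofList [i]))
      (PySem.Dict.empty : PySem.Dict Int (PySem.Set Int))).keys = pvIds xs := by
  have h := PySem.Dict.keys_foldl_insert (pvIds xs)
    (fun (_ : PySem.Dict Int (PySem.Set Int)) (i : Int) => PySem.Set.ofList [i]) PySem.Dict.empty
  rw [h]
  simp only [PySem.Dict.keys_empty]
  rw [PySem.Set.update_nil_left]
  exact PySem.Set.ofList_eq_self_of_nodup _ (nodup_pvIds xs)

theorem pvStepA_cons3 (d : PySem.Dict Int (PySem.Set Int)) (a b c : Int × String) :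
    pvStepA d [a, b, c] =
      if pvIsChild a.2 b.2 c.2 then
        (((((d.modify a.1 PySem.Set.empty (fun s => s.add b.1)).modify
            a.1 PySem.Set.empty (fun s => s.add c.1)).modify
            b.1 PySem.Set.empty (fun s => s.add a.1)).modify
            b.1 PySem.Set.empty (fun s => s.add c.1)).modify
            c.1 PySem.Set.empty (fun s => s.add a.1)).modify
            c.1 PySem.Set.empty (fun s => s.add b.1)
      else d := by
  have h0 : PySem.List.pyGetD [a, b, c] 0 (0, "") = a := by
    rw [PySem.List.pyGetD_ofNat']; rfl
  have h1 : PySem.List.pyGetD [a, b, c] 1 (0, "") = b := by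
    rw [PySem.List.pyGetD_ofNat']; rfl
  have h2 : PySem.List.pyGetD [a, b, c] 2 (0, "") = c := by
    rw [PySem.List.pyGetD_ofNat']; rfl
  unfold pvStepA
  rw [h0, h1, h2]

theorem pvRelL_cons3 (a b c : Int × String) (rest : List (List (Int × String))) (x y : Int) :
    pvRelL ([a, b, c] :: rest) x y ↔
      ((pvIsChild a.2 b.2 c.2 = true ∧ (x = a.1 ∨ x = b.1 ∨ x = c.1) ∧
        (y = a.1 ∨ y = b.1 ∨ y = c.1)) ∨ pvRelL rest x y) := by
  constructor
  · rintro ⟨a', b', c', hmem, hch, hx, hy⟩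
    rcases List.mem_cons.mp hmem with heq | hm
    · obtain ⟨rfl, rfl, rfl⟩ : a' = a ∧ b' = b ∧ c' = c := by simpa using heq
      exact Or.inl ⟨hch, hx, hy⟩
    · exact Or.inr ⟨a', b', c', hm, hch, hx, hy⟩
  · rintro (⟨hch, hx, hy⟩ | ⟨a', b', c', hm, hch, hx, hy⟩)
    · exact ⟨a, b, c, List.mem_cons_self, hch, hx, hy⟩
    · exact ⟨a', b', c', List.mem_cons_of_mem _ hm, hch, hx, hy⟩

-- the six ordered pairs added for one matched triple
def pvSixPairs (k1 k2 k3 x y : Int) : Prop :=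
  (x = k1 ∧ y = k2) ∨ (x = k1 ∧ y = k3) ∨ (x = k2 ∧ y = k1) ∨
  (x = k2 ∧ y = k3) ∨ (x = k3 ∧ y = k1) ∨ (x = k3 ∧ y = k2)

theorem pv_triple_pairs {x y k1 k2 k3 : Int}
    (hx : x = k1 ∨ x = k2 ∨ x = k3) (hy : y = k1 ∨ y = k2 ∨ y = k3) :
    y = x ∨ pvSixPairs k1 k2 k3 x y := by
  unfold pvSixPairs
  rcases hx with rfl | rfl | rfl <;> rcases hy with rfl | rfl | rfl <;> tauto

theorem pv_sixpairs_dest {k1 k2 k3 x y : Int} (h : pvSixPairs k1 k2 k3 x y) :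
    (x = k1 ∨ x = k2 ∨ x = k3) ∧ (y = k1 ∨ y = k2 ∨ y = k3) := by
  unfold pvSixPairs at h; tauto

theorem pv_six_mem (d : PySem.Dict Int (PySem.Set Int)) (k1 k2 k3 : Int) (x y : Int) :
    (y ∈ ((((((d.modify k1 PySem.Set.empty (fun s => s.add k2)).modify
            k1 PySem.Set.empty (fun s => s.add k3)).modify
            k2 PySem.Set.empty (fun s => s.add k1)).modify
            k2 PySem.Set.empty (fun s => s.add k3)).modify
            k3 PySem.Set.empty (fun s => s.add k1)).modify
            k3 PySem.Set.empty (fun s => s.add k2)).getD x PySem.Set.empty) ↔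
      (y ∈ d.getD x PySem.Set.empty ∨ pvSixPairs k1 k2 k3 x y) := by
  unfold pvSixPairs
  rw [pv_mem_getD_modify_add, pv_mem_getD_modify_add, pv_mem_getD_modify_add,
      pv_mem_getD_modify_add, pv_mem_getD_modify_add, pv_mem_getD_modify_add]
  tauto

theorem pv_six_nodup (d : PySem.Dict Int (PySem.Set Int)) (k1 k2 k3 : Int)
    (hnd : ∀ x, (d.getD x PySem.Set.empty).Nodup) (x : Int) :
    (((((((d.modify k1 PySem.Set.empty (fun s => s.add k2)).modify
            k1 PySem.Set.empty (fun s => s.add k3)).modify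
            k2 PySem.Set.empty (fun s => s.add k1)).modify
            k2 PySem.Set.empty (fun s => s.add k3)).modify
            k3 PySem.Set.empty (fun s => s.add k1)).modify
            k3 PySem.Set.empty (fun s => s.add k2)).getD x PySem.Set.empty).Nodup := by
  apply pv_nodup_getD_modify_add
  intro x1; apply pv_nodup_getD_modify_add
  intro x2; apply pv_nodup_getD_modify_add
  intro x3; apply pv_nodup_getD_modify_add
  intro x4; apply pv_nodup_getD_modify_add
  intro x5; apply pv_nodup_getD_modify_add
  exact hnd

theorem pv_six_keys (d : PySem.Dict Int (PySem.Set Int)) (k1 k2 k3 : Int) (U : List Int)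
    (hk : d.keys = U) (h1 : k1 ∈ U) (h2 : k2 ∈ U) (h3 : k3 ∈ U) :
    ((((((d.modify k1 PySem.Set.empty (fun s => s.add k2)).modify
            k1 PySem.Set.empty (fun s => s.add k3)).modify
            k2 PySem.Set.empty (fun s => s.add k1)).modify
            k2 PySem.Set.empty (fun s => s.add k3)).modify
            k3 PySem.Set.empty (fun s => s.add k1)).modify
            k3 PySem.Set.empty (fun s => s.add k2)).keys = U := by
  have s1 := pv_keys_modify_add d k1 k2 (by rw [hk]; exact h1)
  have s2 := pv_keys_modify_add _ k1 k3 (by rw [s1, hk]; exact h1)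
  have s3 := pv_keys_modify_add _ k2 k1 (by rw [s2, s1, hk]; exact h2)
  have s4 := pv_keys_modify_add _ k2 k3 (by rw [s3, s2, s1, hk]; exact h2)
  have s5 := pv_keys_modify_add _ k3 k1 (by rw [s4, s3, s2, s1, hk]; exact h3)
  have s6 := pv_keys_modify_add _ k3 k2 (by rw [s5, s4, s3, s2, s1, hk]; exact h3)
  rw [s6, s5, s4, s3, s2, s1, hk]

theorem pv_foldA_char (xs : List (Int × String)) (hpre : Pre_solve_part3 xs) :
    ∀ (ps : List (List (Int × String))) (d : PySem.Dict Int (PySem.Set Int))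
      (Q : Int → Int → Prop),
    (∀ p ∈ ps, p ∈ PySem.List.permutations xs 3) →
    d.keys = pvIds xs →
    (∀ x, (d.getD x PySem.Set.empty).Nodup) →
    (∀ x y, y ∈ d.getD x PySem.Set.empty ↔ x ∈ pvIds xs ∧ (y = x ∨ Q x y)) →
    (ps.foldl pvStepA d).keys = pvIds xs ∧
    (∀ x, ((ps.foldl pvStepA d).getD x PySem.Set.empty).Nodup) ∧
    (∀ x y, y ∈ (ps.foldl pvStepA d).getD x PySem.Set.empty ↔
      x ∈ pvIds xs ∧ (y = x ∨ Q x y ∨ pvRelL ps x y)) := by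
  intro ps
  induction ps with
  | nil =>
      intro d Q hps hk hnd hmem
      refine ⟨hk, hnd, ?_⟩
      intro x y
      rw [List.foldl_nil, hmem]
      have : ¬ pvRelL [] x y := by rintro ⟨a, b, c, h, -⟩; simp at h
      tauto
  | cons per rest ih =>
      intro d Q hps hk hnd hmem
      obtain ⟨a, b, c, rfl⟩ :=
        shape_of_mem_permutations3 xs per (hps per List.mem_cons_self)
      rw [List.foldl_cons, pvStepA_cons3]
      by_cases hch : pvIsChild a.2 b.2 c.2 = true
      · obtain ⟨ha1, hb1, hc1⟩ := pv_pre_ids xs hpre (hps _ List.mem_cons_self) hch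
        rw [if_pos hch]
        have hk' := pv_six_keys d a.1 b.1 c.1 (pvIds xs) hk ha1 hb1 hc1
        have hnd' := pv_six_nodup d a.1 b.1 c.1 hnd
        have hmem' : ∀ x y,
            (y ∈ ((((((d.modify a.1 PySem.Set.empty (fun s => s.add b.1)).modify
              a.1 PySem.Set.empty (fun s => s.add c.1)).modify
              b.1 PySem.Set.empty (fun s => s.add a.1)).modify
              b.1 PySem.Set.empty (fun s => s.add c.1)).modify
              c.1 PySem.Set.empty (fun s => s.add a.1)).modify
              c.1 PySem.Set.empty (fun s => s.add b.1)).getD x PySem.Set.empty) ↔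
            x ∈ pvIds xs ∧ (y = x ∨ (Q x y ∨
              ((x = a.1 ∨ x = b.1 ∨ x = c.1) ∧ (y = a.1 ∨ y = b.1 ∨ y = c.1)))) := by
          intro x y
          rw [pv_six_mem, hmem]
          constructor
          · rintro (⟨hU, hyx⟩ | hp)
            · exact ⟨hU, by tauto⟩
            · obtain ⟨hx3, hy3⟩ := pv_sixpairs_dest hp
              have hU : x ∈ pvIds xs := by rcases hx3 with rfl | rfl | rfl <;> assumption
              exact ⟨hU, Or.inr (Or.inr ⟨hx3, hy3⟩)⟩
          · rintro ⟨hU, rfl | hQ | ⟨hx3, hy3⟩⟩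
            · exact Or.inl ⟨hU, Or.inl rfl⟩
            · exact Or.inl ⟨hU, Or.inr hQ⟩
            · rcases pv_triple_pairs hx3 hy3 with hyx | hp
              · exact Or.inl ⟨hU, Or.inl hyx⟩
              · exact Or.inr hp
        have hres := ih _ (fun x y => Q x y ∨
            ((x = a.1 ∨ x = b.1 ∨ x = c.1) ∧ (y = a.1 ∨ y = b.1 ∨ y = c.1)))
          (fun p hp => hps p (List.mem_cons_of_mem _ hp)) hk' hnd' hmem'
        refine ⟨hres.1, hres.2.1, ?_⟩
        intro x y
        rw [hres.2.2, pvRelL_cons3]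
        constructor
        · rintro ⟨hU, h⟩
          refine ⟨hU, ?_⟩
          rcases h with h | h | h
          · exact Or.inl h
          · rcases h with h | ⟨hx3, hy3⟩
            · exact Or.inr (Or.inl h)
            · exact Or.inr (Or.inr (Or.inl ⟨hch, hx3, hy3⟩))
          · exact Or.inr (Or.inr (Or.inr h))
        · rintro ⟨hU, h⟩
          refine ⟨hU, ?_⟩
          rcases h with h | h | h
          · exact Or.inl h
          · exact Or.inr (Or.inl (Or.inl h))
          · rcases h with ⟨-, hx3, hy3⟩ | h
            · exact Or.inr (Or.inl (Or.inr ⟨hx3, hy3⟩))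
            · exact Or.inr (Or.inr h)
      · rw [if_neg hch]
        have hres := ih d Q (fun p hp => hps p (List.mem_cons_of_mem _ hp)) hk hnd hmem
        refine ⟨hres.1, hres.2.1, ?_⟩
        intro x y
        rw [hres.2.2, pvRelL_cons3]
        constructor
        · rintro ⟨hU, h⟩
          refine ⟨hU, ?_⟩
          rcases h with h | h | h
          · exact Or.inl h
          · exact Or.inr (Or.inl h)
          · exact Or.inr (Or.inr (Or.inr h))
        · rintro ⟨hU, h⟩
          refine ⟨hU, ?_⟩
          rcases h with h | h | h
          · exact Or.inl h
          · exact Or.inr (Or.inl h)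
          · rcases h with ⟨hchh, -, -⟩ | h
            · exact absurd hchh hch
            · exact Or.inr (Or.inr h)

-- ---- the connectivity relation ----

theorem pvRel_symm (xs : List (Int × String)) {x y : Int} (h : pvRel xs x y) :
    pvRel xs y x := by
  obtain ⟨a, b, c, hm, hch, hx, hy⟩ := h
  exact ⟨a, b, c, hm, hch, hy, hx⟩

theorem pvConn_symm (xs : List (Int × String)) {x y : Int} (h : pvConn xs x y) :
    pvConn xs y x :=
  Relation.ReflTransGen.symmetric (fun _ _ hr => pvRel_symm xs hr) h

theorem pvRel_mem (xs : List (Int × String)) (hpre : Pre_solve_part3 xs) {x y : Int}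
    (h : pvRel xs x y) : x ∈ pvIds xs ∧ y ∈ pvIds xs := by
  obtain ⟨a, b, c, hm, hch, hx, hy⟩ := h
  obtain ⟨ha1, hb1, hc1⟩ := pv_pre_ids xs hpre hm hch
  constructor
  · rcases hx with rfl | rfl | rfl <;> assumption
  · rcases hy with rfl | rfl | rfl <;> assumption

theorem pvConn_mem (xs : List (Int × String)) (hpre : Pre_solve_part3 xs) {v w : Int}
    (h : pvConn xs v w) (hv : v ∈ pvIds xs) : w ∈ pvIds xs := by
  induction h with
  | refl => exact hv
  | tail _ h2 ih => exact (pvRel_mem xs hpre h2).2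

-- ---- the fully built related dict ----

theorem pv_related_char (xs : List (Int × String)) (hpre : Pre_solve_part3 xs) :
    ((PySem.List.permutations xs 3).foldl pvStepA
      ((PySem.List.pyRange 1 ((xs.length : Int) + 1)).foldl
        (fun d i => d.insert i (PySem.Set.ofList [i])) PySem.Dict.empty)).keys = pvIds xs ∧
    (∀ x, (((PySem.List.permutations xs 3).foldl pvStepA
      ((PySem.List.pyRange 1 ((xs.length : Int) + 1)).foldl
        (fun d i => d.insert i (PySem.Set.ofList [i]))
          PySem.Dict.empty)).getD x PySem.Set.empty).Nodup) ∧
    (∀ x y, y ∈ ((PySem.List.permutations xs 3).foldl pvStepA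
      ((PySem.List.pyRange 1 ((xs.length : Int) + 1)).foldl
        (fun d i => d.insert i (PySem.Set.ofList [i]))
          PySem.Dict.empty)).getD x PySem.Set.empty ↔
      x ∈ pvIds xs ∧ (y = x ∨ pvRel xs x y)) := by
  rw [show (PySem.List.pyRange 1 ((xs.length : Int) + 1)) = pvIds xs from rfl]
  have hinit_mem : ∀ x y, y ∈ ((PySem.List.pyRange 1 ((xs.length : Int) + 1)).foldl
      (fun d i => d.insert i (PySem.Set.ofList [i]))
        (PySem.Dict.empty : PySem.Dict Int (PySem.Set Int))).getD x PySem.Set.empty ↔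
      x ∈ pvIds xs ∧ (y = x ∨ (fun _ _ => False) x y) := by
    intro x y
    rw [show (PySem.List.pyRange 1 ((xs.length : Int) + 1)) = pvIds xs from rfl]
    rw [pv_getD_init]
    by_cases hx : x ∈ pvIds xs
    · simp [hx]
    · simp [hx]
  have hinit_nd : ∀ x, (((PySem.List.pyRange 1 ((xs.length : Int) + 1)).foldl
      (fun d i => d.insert i (PySem.Set.ofList [i]))
        (PySem.Dict.empty : PySem.Dict Int (PySem.Set Int))).getD x PySem.Set.empty).Nodup := by
    intro x
    rw [show (PySem.List.pyRange 1 ((xs.length : Int) + 1)) = pvIds xs from rfl, pv_getD_init]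
    by_cases hx : x ∈ pvIds xs <;> simp [hx]
  have h := pv_foldA_char xs hpre (PySem.List.permutations xs 3) _ (fun _ _ => False)
    (fun p hp => hp) (pv_keys_init xs) hinit_nd hinit_mem
  refine ⟨h.1, h.2.1, ?_⟩
  intro x y
  rw [h.2.2]
  unfold pvRel
  tauto

-- ---- BFS: the inner neighbour loop ----

theorem pv_contains_eq_false {s : PySem.Set Int} {x : Int} (h : x ∉ s) :
    s.contains x = false := by
  rw [← Bool.not_eq_true]
  intro hc
  exact h ((PySem.Set.contains_iff _ _).mp hc)

theorem pv_bfs_fold : ∀ (nb : List Int), nb.Nodup → ∀ (found : PySem.Set Int) (acc : List Int),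
    nb.foldl (fun (st : PySem.Set Int × List Int) e =>
        if st.1.contains e then st else (st.1.add e, st.2 ++ [e])) (found, acc)
      = (found.update nb, acc ++ nb.filter (fun e => !(found.contains e))) := by
  intro nb
  induction nb with
  | nil => intro _ found acc; simp [PySem.Set.update_nil]
  | cons e t ih =>
      intro hnd found acc
      have hndt : t.Nodup := (List.nodup_cons.mp hnd).2
      have het : e ∉ t := (List.nodup_cons.mp hnd).1
      rw [List.foldl_cons, PySem.Set.update_cons, List.filter_cons]
      by_cases hc : found.contains e = true
      · have hef : e ∈ found := (PySem.Set.contains_iff _ _).mp hc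
        rw [if_pos hc, PySem.Set.add_of_mem hef, ih hndt]
        simp [hc]
        exact hef
      · have hc' : found.contains e = false := by
          rcases Bool.eq_false_or_eq_true (found.contains e) with h | h
          · exact absurd h hc
          · exact h
        rw [if_neg hc, ih hndt]
        have hfilter : t.filter (fun x => !(found.add e).contains x)
            = t.filter (fun x => !found.contains x) := by
          apply List.filter_congr
          intro x hx
          have hxe : x ≠ e := fun h => het (h ▸ hx)
          congr 1
          by_cases hxf : x ∈ found
          · rw [(PySem.Set.contains_iff _ _).mpr hxf,
              (PySem.Set.contains_iff _ _).mpr ((PySem.Set.mem_add _ _ _).mpr (Or.inl hxf))]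
          · have h1 : x ∉ found.add e := by
              rw [PySem.Set.mem_add]
              rintro (h | h)
              · exact hxf h
              · exact hxe h
            rw [pv_contains_eq_false h1, pv_contains_eq_false hxf]
        rw [hfilter]
        simp [hc', List.append_assoc]
        exact fun h => hc ((PySem.Set.contains_iff _ _).mpr h)

-- remaining-universe counting: adding the fresh elements shrinks the unfound part exactly
theorem pv_count (U : List Int) (hU : U.Nodup) (found found' : PySem.Set Int) (adds : List Int)
    (hadnd : adds.Nodup) (hsub : ∀ x ∈ adds, x ∈ U) (hdis : ∀ x ∈ adds, x ∉ found)
    (hmem : ∀ x : Int, x ∈ found' ↔ x ∈ found ∨ x ∈ adds) :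
    (U.filter (fun v => !(found'.contains v))).length + adds.length
      = (U.filter (fun v => !(found.contains v))).length := by
  have hnd1 : (U.filter (fun v => !(found'.contains v))).Nodup := hU.filter _
  have hnd2 : (U.filter (fun v => decide (v ∈ adds))).Nodup := hU.filter _
  have hmemf : ∀ x : Int, x ∈ U.filter (fun v => !(found'.contains v)) ↔
      x ∈ U ∧ x ∉ found' := by
    intro x
    rw [List.mem_filter]
    constructor
    · rintro ⟨h1, h2⟩
      refine ⟨h1, fun hm => ?_⟩
      rw [(PySem.Set.contains_iff _ _).mpr hm] at h2
      simp at h2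
    · rintro ⟨h1, h2⟩
      exact ⟨h1, by rw [pv_contains_eq_false h2]; rfl⟩
  have hmemg : ∀ x : Int, x ∈ U.filter (fun v => !(found.contains v)) ↔
      x ∈ U ∧ x ∉ found := by
    intro x
    rw [List.mem_filter]
    constructor
    · rintro ⟨h1, h2⟩
      refine ⟨h1, fun hm => ?_⟩
      rw [(PySem.Set.contains_iff _ _).mpr hm] at h2
      simp at h2
    · rintro ⟨h1, h2⟩
      exact ⟨h1, by rw [pv_contains_eq_false h2]; rfl⟩
  have hperm : (U.filter (fun v => !(found.contains v))).Perm
      ((U.filter (fun v => !(found'.contains v))) ++ (U.filter (fun v => decide (v ∈ adds)))) := by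
    rw [List.perm_ext_iff_of_nodup (hU.filter _) ?_]
    · intro x
      rw [List.mem_append, hmemg, hmemf, List.mem_filter]
      constructor
      · rintro ⟨h1, h2⟩
        by_cases hxa : x ∈ adds
        · exact Or.inr ⟨h1, by simpa using hxa⟩
        · exact Or.inl ⟨h1, fun hm => (hmem x).mp hm |>.elim h2 hxa⟩
      · rintro (⟨h1, h2⟩ | ⟨h1, h2⟩)
        · exact ⟨h1, fun hm => h2 ((hmem x).mpr (Or.inl hm))⟩
        · exact ⟨h1, hdis x (by simpa using h2)⟩
    · refine List.Nodup.append hnd1 hnd2 ?_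
      intro x hx1 hx2
      rw [hmemf] at hx1
      rw [List.mem_filter] at hx2
      exact hx1.2 ((hmem x).mpr (Or.inr (by simpa using hx2.2)))
  have hperm2 : (U.filter (fun v => decide (v ∈ adds))).Perm adds := by
    rw [List.perm_ext_iff_of_nodup hnd2 hadnd]
    intro x
    rw [List.mem_filter]
    constructor
    · rintro ⟨-, h⟩
      simpa using h
    · intro h
      exact ⟨hsub x h, by simpa using h⟩
  have := hperm.length_eq
  rw [List.length_append, hperm2.length_eq] at this
  omega

theorem pv_bfs_main (xs : List (Int × String)) (hpre : Pre_solve_part3 xs)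
    (related : PySem.Dict Int (PySem.Set Int))
    (hrel : ∀ x y, y ∈ related.getD x PySem.Set.empty ↔
      x ∈ pvIds xs ∧ (y = x ∨ pvRel xs x y))
    (hnd : ∀ x, (related.getD x PySem.Set.empty).Nodup) (start : Int) :
    ∀ (fuel : Nat) (found : PySem.Set Int) (queue : List Int),
    found.Nodup →
    (∀ q ∈ queue, q ∈ found) →
    (∀ x ∈ found, x ∈ pvIds xs) →
    (∀ x ∈ found, pvConn xs start x) →
    (∀ x ∈ found, x ∉ queue → ∀ y, y ∈ related.getD x PySem.Set.empty → y ∈ found) →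
    queue.length + ((pvIds xs).filter (fun v => !(found.contains v))).length ≤ fuel →
    (pvGetFamilyLoop related fuel found queue).Nodup ∧
    (∀ x ∈ found, x ∈ pvGetFamilyLoop related fuel found queue) ∧
    (∀ x ∈ pvGetFamilyLoop related fuel found queue, pvConn xs start x) ∧
    (∀ x ∈ pvGetFamilyLoop related fuel found queue,
      ∀ y, y ∈ related.getD x PySem.Set.empty → y ∈ pvGetFamilyLoop related fuel found queue) := by
  intro fuel
  induction fuel with
  | zero =>
      intro found queue hfnd hq hids hconn hcl hfuel
      have hq0 : queue = [] := by
        cases queue with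
        | nil => rfl
        | cons c r => exfalso; simp at hfuel
      subst hq0
      simp only [pvGetFamilyLoop]
      exact ⟨hfnd, fun x hx => hx, hconn, fun x hx y hy => hcl x hx (by simp) y hy⟩
  | succ fuel ih =>
      intro found queue hfnd hq hids hconn hcl hfuel
      cases queue with
      | nil =>
          simp only [pvGetFamilyLoop]
          exact ⟨hfnd, fun x hx => hx, hconn, fun x hx y hy => hcl x hx (by simp) y hy⟩
      | cons cur rest =>
          have hcurF : cur ∈ found := hq cur List.mem_cons_self
          have hcurIds : cur ∈ pvIds xs := hids cur hcurF
          have hcurConn : pvConn xs start cur := hconn cur hcurF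
          have hnbnd : (related.getD cur PySem.Set.empty).Nodup := hnd cur
          have hnbmem : ∀ y, y ∈ related.getD cur PySem.Set.empty ↔
              (y = cur ∨ pvRel xs cur y) := by
            intro y
            rw [hrel]
            exact ⟨fun h => h.2, fun h => ⟨hcurIds, h⟩⟩
          have hnbids : ∀ y ∈ related.getD cur PySem.Set.empty, y ∈ pvIds xs := by
            intro y hy
            rcases (hnbmem y).mp hy with rfl | hr
            · exact hcurIds
            · exact (pvRel_mem xs hpre hr).2
          simp only [pvGetFamilyLoop]
          rw [pv_bfs_fold _ hnbnd found []]
          simp only [List.nil_append]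
          have haddsmem : ∀ x : Int,
              x ∈ (related.getD cur PySem.Set.empty).filter (fun e => !(found.contains e)) ↔
              x ∈ related.getD cur PySem.Set.empty ∧ x ∉ found := by
            intro x
            rw [List.mem_filter]
            constructor
            · rintro ⟨h1, h2⟩
              refine ⟨h1, fun hm => ?_⟩
              rw [(PySem.Set.contains_iff _ _).mpr hm] at h2
              simp at h2
            · rintro ⟨h1, h2⟩
              exact ⟨h1, by rw [pv_contains_eq_false h2]; rfl⟩
          have haddsnd := hnbnd.filter (fun e => !(found.contains e))
          have hfound'mem : ∀ x : Int,
              x ∈ found.update (related.getD cur PySem.Set.empty) ↔ x ∈ found ∨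
              x ∈ (related.getD cur PySem.Set.empty).filter (fun e => !(found.contains e)) := by
            intro x
            rw [PySem.Set.mem_update]
            constructor
            · rintro (h | h)
              · exact Or.inl h
              · by_cases hf : x ∈ found
                · exact Or.inl hf
                · exact Or.inr ((haddsmem x).mpr ⟨h, hf⟩)
            · rintro (h | h)
              · exact Or.inl h
              · exact Or.inr (List.mem_of_mem_filter h)
          refine ?_
          have hres := ih (found.update (related.getD cur PySem.Set.empty))
            (rest ++ (related.getD cur PySem.Set.empty).filter (fun e => !(found.contains e)))
            (PySem.Set.nodup_update _ _ hfnd)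
            ?_ ?_ ?_ ?_ ?_
          · refine ⟨hres.1, ?_, hres.2.2.1, hres.2.2.2⟩
            intro x hx
            exact hres.2.1 x ((hfound'mem x).mpr (Or.inl hx))
          · -- queue' ⊆ found'
            intro q hq'
            rcases List.mem_append.mp hq' with h | h
            · exact (hfound'mem q).mpr (Or.inl (hq q (List.mem_cons_of_mem _ h)))
            · exact (hfound'mem q).mpr (Or.inr h)
          · -- found' ⊆ ids
            intro x hx
            rcases (hfound'mem x).mp hx with h | h
            · exact hids x h
            · exact hnbids x (List.mem_of_mem_filter h)
          · -- conn
            intro x hx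
            rcases (hfound'mem x).mp hx with h | h
            · exact hconn x h
            · rcases (hnbmem x).mp (List.mem_of_mem_filter h) with rfl | hr
              · exact hcurConn
              · exact Relation.ReflTransGen.tail hcurConn hr
          · -- closedness
            intro x hx hnq y hy
            rcases (hfound'mem x).mp hx with hxf | hxa
            · by_cases hxc : x = cur
              · subst hxc
                exact (hfound'mem y).mpr ((hfound'mem y).mp
                  ((PySem.Set.mem_update _ _ _).mpr (Or.inr hy)) |>.elim Or.inl Or.inr)
              · have hxq : x ∉ cur :: rest := by
                  intro hm
                  rcases List.mem_cons.mp hm with h | h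
                  · exact hxc h
                  · exact hnq (List.mem_append.mpr (Or.inl h))
                exact (hfound'mem y).mpr (Or.inl (hcl x hxf hxq y hy))
            · exact absurd (List.mem_append.mpr (Or.inr hxa)) hnq
          · -- fuel bound
            have hcount := pv_count (pvIds xs) (nodup_pvIds xs) found
              (found.update (related.getD cur PySem.Set.empty))
              ((related.getD cur PySem.Set.empty).filter (fun e => !(found.contains e)))
              haddsnd
              (fun x hx => hnbids x (List.mem_of_mem_filter hx))
              (fun x hx => ((haddsmem x).mp hx).2)
              hfound'mem
            rw [List.length_append]
            simp only [List.length_cons] at hfuel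
            omega

theorem pv_size_of_keys (d : PySem.Dict Int (PySem.Set Int)) (xs : List (Int × String))
    (h : d.keys = pvIds xs) : d.size = xs.length := by
  have h2 := congrArg List.length h
  rw [length_pvIds] at h2
  rw [← h2]
  simp [PySem.Dict.keys, PySem.Dict.size]

theorem pv_getFamily_char (xs : List (Int × String)) (hpre : Pre_solve_part3 xs)
    (related : PySem.Dict Int (PySem.Set Int))
    (hrel : ∀ x y, y ∈ related.getD x PySem.Set.empty ↔
      x ∈ pvIds xs ∧ (y = x ∨ pvRel xs x y))
    (hnd : ∀ x, (related.getD x PySem.Set.empty).Nodup)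
    (hsize : related.size = xs.length)
    (start : Int) (hstart : start ∈ pvIds xs) :
    (pvGetFamily related start).Nodup ∧
    (∀ z, z ∈ pvGetFamily related start ↔ pvConn xs start z) := by
  have hstart0 : PySem.Set.add PySem.Set.empty start = [start] := by
    rw [PySem.Set.add_of_not_mem (by simp)]
    rfl
  have hres := pv_bfs_main xs hpre related hrel hnd start (related.size + 1)
    (PySem.Set.add PySem.Set.empty start) [start]
    (by rw [hstart0]; exact List.nodup_singleton start)
    (by rw [hstart0]; intro q hqm; exact hqm)
    (by rw [hstart0]; intro x hx; rcases List.mem_singleton.mp hx with rfl; exact hstart)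
    (by rw [hstart0]; intro x hx; rcases List.mem_singleton.mp hx with rfl;
        exact Relation.ReflTransGen.refl)
    (by rw [hstart0]; intro x hx hnq; exact absurd hx hnq)
    (by
      have hle := List.length_filter_le
        (fun v => !((PySem.Set.add PySem.Set.empty start).contains v)) (pvIds xs)
      rw [length_pvIds] at hle
      simp only [List.length_singleton]
      omega)
  unfold pvGetFamily
  refine ⟨hres.1, ?_⟩
  intro z
  constructor
  · exact fun hz => hres.2.2.1 z hz
  · intro hz
    induction hz with
    | refl =>
        exact hres.2.1 start (by rw [hstart0]; exact List.mem_singleton_self start)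
    | tail hc hr ihz =>
        rename_i b c
        have hbR := ihz
        have hbIds : b ∈ pvIds xs := pvConn_mem xs hpre (hres.2.2.1 b hbR) hstart
        exact hres.2.2.2 b hbR c ((hrel b c).mpr ⟨hbIds, Or.inr hr⟩)

-- ---- B: labels ----

theorem pv_labf_map (lab : List Int) (f : Int → Int) (v : Int) (hv0 : 0 ≤ v)
    (hvlt : v < (lab.length : Int)) : pvLabf (lab.map f) v = f (pvLabf lab v) := by
  unfold pvLabf
  rw [PySem.List.pyGetD_eq_getElem _ _ hv0 (by simpa using hvlt),
      PySem.List.pyGetD_eq_getElem _ _ hv0 hvlt]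
  simp

theorem pvStepB_cons3 (lab : List Int) (a b c : Int × String) :
    pvStepB lab [a, b, c] =
      if pvIsChild2 a.2 b.2 c.2 then pvUnion (pvUnion lab a.1 b.1) a.1 c.1 else lab := rfl

theorem pv_union_length (lab : List Int) (u w : Int) :
    (pvUnion lab u w).length = lab.length := by
  simp only [pvUnion]
  split <;> simp

theorem pv_union_labf (lab : List Int) (u w v : Int) (hv0 : 0 ≤ v)
    (hvlt : v < (lab.length : Int)) :
    pvLabf (pvUnion lab u w) v =
      (if pvLabf lab v = PySem.List.pyGetD lab u 0 then PySem.List.pyGetD lab w 0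
       else pvLabf lab v) := by
  unfold pvUnion
  by_cases hxy : PySem.List.pyGetD lab u 0 ≠ PySem.List.pyGetD lab w 0
  · rw [if_pos hxy, pv_labf_map _ _ _ hv0 hvlt]
  · rw [if_neg hxy]
    push_neg at hxy
    by_cases h : pvLabf lab v = PySem.List.pyGetD lab u 0
    · rw [if_pos h, h, hxy]
    · rw [if_neg h]

theorem pv_union_equalizes (lab : List Int) (u w : Int) (hu0 : 0 ≤ u)
    (hult : u < (lab.length : Int)) (hw0 : 0 ≤ w) (hwlt : w < (lab.length : Int)) :
    pvLabf (pvUnion lab u w) u = pvLabf (pvUnion lab u w) w := by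
  rw [pv_union_labf _ _ _ _ hu0 hult, pv_union_labf _ _ _ _ hw0 hwlt]
  have hu : pvLabf lab u = PySem.List.pyGetD lab u 0 := rfl
  have hw : pvLabf lab w = PySem.List.pyGetD lab w 0 := rfl
  rw [if_pos hu]
  by_cases h : pvLabf lab w = PySem.List.pyGetD lab u 0
  · rw [if_pos h]
  · rw [if_neg h]
    exact hw.symm

-- one pvStepB acts on every in-range label slot by one function
theorem pv_stepB_g (lab : List Int) (per : List (Int × String)) :
    (pvStepB lab per).length = lab.length ∧ ∃ g : Int → Int, ∀ v : Int, 0 ≤ v →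
      v < (lab.length : Int) → pvLabf (pvStepB lab per) v = g (pvLabf lab v) := by
  match per with
  | [a, b, c] =>
      rw [pvStepB_cons3]
      by_cases hch : pvIsChild2 a.2 b.2 c.2 = true
      · rw [if_pos hch]
        refine ⟨by rw [pv_union_length, pv_union_length], ?_⟩
        refine ⟨(fun z =>
          (if (if z = PySem.List.pyGetD lab a.1 0 then PySem.List.pyGetD lab b.1 0 else z) =
              PySem.List.pyGetD (pvUnion lab a.1 b.1) a.1 0
           then PySem.List.pyGetD (pvUnion lab a.1 b.1) c.1 0
           else (if z = PySem.List.pyGetD lab a.1 0 then PySem.List.pyGetD lab b.1 0 else z))), ?_⟩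
        intro v hv0 hvlt
        rw [pv_union_labf _ _ _ _ hv0 (by rw [pv_union_length]; exact hvlt),
            pv_union_labf _ _ _ _ hv0 hvlt]
      · rw [if_neg hch]
        exact ⟨rfl, fun z => z, fun v _ _ => rfl⟩
  | [] => exact ⟨rfl, fun z => z, fun v _ _ => rfl⟩
  | [a] => exact ⟨rfl, fun z => z, fun v _ _ => rfl⟩
  | [a, b] => exact ⟨rfl, fun z => z, fun v _ _ => rfl⟩
  | a :: b :: c :: d :: t => exact ⟨rfl, fun z => z, fun v _ _ => rfl⟩

theorem pv_foldB_g (ps : List (List (Int × String))) : ∀ (lab : List Int),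
    ((ps.foldl pvStepB lab).length = lab.length ∧ ∃ g : Int → Int, ∀ v : Int, 0 ≤ v →
      v < (lab.length : Int) → pvLabf (ps.foldl pvStepB lab) v = g (pvLabf lab v)) := by
  induction ps with
  | nil => intro lab; exact ⟨rfl, fun z => z, fun v _ _ => rfl⟩
  | cons per rest ih =>
      intro lab
      rw [List.foldl_cons]
      obtain ⟨hlen1, g1, hg1⟩ := pv_stepB_g lab per
      obtain ⟨hlen2, g2, hg2⟩ := ih (pvStepB lab per)
      refine ⟨by rw [hlen2, hlen1], g2 ∘ g1, ?_⟩
      intro v hv0 hvlt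
      rw [hg2 v hv0 (by rw [hlen1]; exact hvlt), hg1 v hv0 hvlt]
      rfl

theorem pv_id_bounds (xs : List (Int × String)) {v : Int} (hv : v ∈ pvIds xs)
    (len : Nat) (hlen : len = xs.length + 1) : 0 ≤ v ∧ v < (len : Int) := by
  have := (mem_pvIds xs v).mp hv
  subst hlen
  push_cast
  omega

theorem pv_union_sound (xs : List (Int × String)) (lab : List Int)
    (hlen : lab.length = xs.length + 1) (u w : Int)
    (hu : u ∈ pvIds xs) (hw : w ∈ pvIds xs) (hedge : pvRel xs u w)
    (hs : ∀ v v', v ∈ pvIds xs → v' ∈ pvIds xs →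
      pvLabf lab v = pvLabf lab v' → pvConn xs v v') :
    ∀ v v', v ∈ pvIds xs → v' ∈ pvIds xs →
      pvLabf (pvUnion lab u w) v = pvLabf (pvUnion lab u w) v' → pvConn xs v v' := by
  intro v v' hv hv' heq
  obtain ⟨hv0, hvlt⟩ := pv_id_bounds xs hv lab.length hlen
  obtain ⟨hv'0, hv'lt⟩ := pv_id_bounds xs hv' lab.length hlen
  rw [pv_union_labf _ _ _ _ hv0 hvlt, pv_union_labf _ _ _ _ hv'0 hv'lt] at heq
  have hlu : pvLabf lab u = PySem.List.pyGetD lab u 0 := rfl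
  have hlw : pvLabf lab w = PySem.List.pyGetD lab w 0 := rfl
  by_cases h1 : pvLabf lab v = PySem.List.pyGetD lab u 0 <;>
    by_cases h2 : pvLabf lab v' = PySem.List.pyGetD lab u 0
  · exact hs v v' hv hv' (h1.trans h2.symm)
  · rw [if_pos h1, if_neg h2] at heq
    have cvu : pvConn xs v u := hs v u hv hu (h1.trans hlu.symm)
    have cv'w : pvConn xs v' w := hs v' w hv' hw (heq.symm.trans hlw.symm)
    exact Relation.ReflTransGen.trans (Relation.ReflTransGen.tail cvu hedge)
      (pvConn_symm xs cv'w)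
  · rw [if_neg h1, if_pos h2] at heq
    have cv'u : pvConn xs v' u := hs v' u hv' hu (h2.trans hlu.symm)
    have cvw : pvConn xs v w := hs v w hv hw (heq.trans hlw.symm)
    exact pvConn_symm xs (Relation.ReflTransGen.trans
      (Relation.ReflTransGen.tail cv'u hedge) (pvConn_symm xs cvw))
  · rw [if_neg h1, if_neg h2] at heq
    exact hs v v' hv hv' heq

theorem pv_foldB_sound (xs : List (Int × String)) (hpre : Pre_solve_part3 xs) :
    ∀ (ps : List (List (Int × String))) (lab : List Int),
    (∀ p ∈ ps, p ∈ PySem.List.permutations xs 3) →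
    lab.length = xs.length + 1 →
    (∀ v v', v ∈ pvIds xs → v' ∈ pvIds xs →
      pvLabf lab v = pvLabf lab v' → pvConn xs v v') →
    (∀ v v', v ∈ pvIds xs → v' ∈ pvIds xs →
      pvLabf (ps.foldl pvStepB lab) v = pvLabf (ps.foldl pvStepB lab) v' → pvConn xs v v') := by
  intro ps
  induction ps with
  | nil => intro lab _ _ hs; exact hs
  | cons per rest ih =>
      intro lab hps hlen hs
      obtain ⟨a, b, c, rfl⟩ :=
        shape_of_mem_permutations3 xs per (hps per List.mem_cons_self)
      have hm : [a, b, c] ∈ PySem.List.permutations xs 3 := hps _ List.mem_cons_self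
      rw [List.foldl_cons, pvStepB_cons3]
      by_cases hch : pvIsChild2 a.2 b.2 c.2 = true
      · rw [if_pos hch]
        have hch' : pvIsChild a.2 b.2 c.2 = true := by rw [← isChild2_eq]; exact hch
        obtain ⟨ha1, hb1, hc1⟩ := pv_pre_ids xs hpre hm hch'
        have hedge1 : pvRel xs a.1 b.1 :=
          ⟨a, b, c, hm, hch', Or.inl rfl, Or.inr (Or.inl rfl)⟩
        have hedge2 : pvRel xs a.1 c.1 :=
          ⟨a, b, c, hm, hch', Or.inl rfl, Or.inr (Or.inr rfl)⟩
        have hs1 := pv_union_sound xs lab hlen a.1 b.1 ha1 hb1 hedge1 hs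
        have hlen1 : (pvUnion lab a.1 b.1).length = xs.length + 1 := by
          rw [pv_union_length, hlen]
        have hs2 := pv_union_sound xs (pvUnion lab a.1 b.1) hlen1 a.1 c.1 ha1 hc1 hedge2 hs1
        have hlen2 : (pvUnion (pvUnion lab a.1 b.1) a.1 c.1).length = xs.length + 1 := by
          rw [pv_union_length, hlen1]
        exact ih _ (fun p hp => hps p (List.mem_cons_of_mem _ hp)) hlen2 hs2
      · rw [if_neg hch]
        exact ih _ (fun p hp => hps p (List.mem_cons_of_mem _ hp)) hlen hs

theorem pv_foldB_edges (xs : List (Int × String)) (hpre : Pre_solve_part3 xs) :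
    ∀ (ps : List (List (Int × String))) (lab : List Int),
    (∀ p ∈ ps, p ∈ PySem.List.permutations xs 3) →
    lab.length = xs.length + 1 →
    ∀ a b c : Int × String, [a, b, c] ∈ ps → pvIsChild a.2 b.2 c.2 = true →
      pvLabf (ps.foldl pvStepB lab) a.1 = pvLabf (ps.foldl pvStepB lab) b.1 ∧
      pvLabf (ps.foldl pvStepB lab) a.1 = pvLabf (ps.foldl pvStepB lab) c.1 := by
  intro ps
  induction ps with
  | nil => intro lab _ _ a b c hm; simp at hm
  | cons per rest ih =>
      intro lab hps hlen a b c hm hch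
      rcases List.mem_cons.mp hm with heq | hmr
      · subst heq
        have hmp : [a, b, c] ∈ PySem.List.permutations xs 3 := hps _ List.mem_cons_self
        obtain ⟨ha1, hb1, hc1⟩ := pv_pre_ids xs hpre hmp hch
        obtain ⟨ha0, halt⟩ := pv_id_bounds xs ha1 lab.length hlen
        obtain ⟨hb0, hblt⟩ := pv_id_bounds xs hb1 lab.length hlen
        obtain ⟨hc0, hclt⟩ := pv_id_bounds xs hc1 lab.length hlen
        rw [List.foldl_cons, pvStepB_cons3]
        have hch2 : pvIsChild2 a.2 b.2 c.2 = true := by rw [isChild2_eq]; exact hch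
        rw [if_pos hch2]
        have hlen1 : (pvUnion lab a.1 b.1).length = lab.length := pv_union_length _ _ _
        have e1 : pvLabf (pvUnion lab a.1 b.1) a.1 = pvLabf (pvUnion lab a.1 b.1) b.1 :=
          pv_union_equalizes lab a.1 b.1 ha0 halt hb0 hblt
        have e2 : pvLabf (pvUnion (pvUnion lab a.1 b.1) a.1 c.1) a.1
            = pvLabf (pvUnion (pvUnion lab a.1 b.1) a.1 c.1) c.1 :=
          pv_union_equalizes _ a.1 c.1 ha0 (by rw [hlen1]; exact halt) hc0
            (by rw [hlen1]; exact hclt)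
        have e1' : pvLabf (pvUnion (pvUnion lab a.1 b.1) a.1 c.1) a.1
            = pvLabf (pvUnion (pvUnion lab a.1 b.1) a.1 c.1) b.1 := by
          rw [pv_union_labf _ _ _ _ ha0 (by rw [hlen1]; exact halt),
              pv_union_labf _ _ _ _ hb0 (by rw [hlen1]; exact hblt), e1]
        obtain ⟨hlenf, g, hg⟩ := pv_foldB_g rest (pvUnion (pvUnion lab a.1 b.1) a.1 c.1)
        have hlen2 : (pvUnion (pvUnion lab a.1 b.1) a.1 c.1).length = lab.length := by
          rw [pv_union_length, hlen1]
        constructor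
        · rw [hg a.1 ha0 (by rw [hlen2]; exact halt), hg b.1 hb0 (by rw [hlen2]; exact hblt), e1']
        · rw [hg a.1 ha0 (by rw [hlen2]; exact halt), hg c.1 hc0 (by rw [hlen2]; exact hclt), e2]
      · obtain ⟨hlen1, -⟩ := pv_stepB_g lab per
        rw [List.foldl_cons]
        exact ih (pvStepB lab per) (fun p hp => hps p (List.mem_cons_of_mem _ hp))
          (by rw [hlen1, hlen]) a b c hmr hch

theorem pv_labf_init (n : Nat) (v : Int) (h1 : 0 ≤ v) (h2 : v < (n : Int) + 1) :
    pvLabf ((List.range (n + 1)).map Int.ofNat) v = v := by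
  have hl : ((List.range (n + 1)).map Int.ofNat).length = n + 1 := by simp
  unfold pvLabf
  rw [PySem.List.pyGetD_eq_getElem _ _ h1 (by rw [hl]; push_cast; omega)]
  simp
  omega

theorem pv_label_char (xs : List (Int × String)) (hpre : Pre_solve_part3 xs) :
    ((PySem.List.permutations xs 3).foldl pvStepB
      ((List.range (xs.length + 1)).map Int.ofNat)).length = xs.length + 1 ∧
    ∀ v w, v ∈ pvIds xs → w ∈ pvIds xs →
      (pvLabf ((PySem.List.permutations xs 3).foldl pvStepB
          ((List.range (xs.length + 1)).map Int.ofNat)) v =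
        pvLabf ((PySem.List.permutations xs 3).foldl pvStepB
          ((List.range (xs.length + 1)).map Int.ofNat)) w ↔ pvConn xs v w) := by
  have hlen0 : ((List.range (xs.length + 1)).map Int.ofNat).length
      = xs.length + 1 := by simp
  obtain ⟨hlenf, -, -⟩ := pv_foldB_g (PySem.List.permutations xs 3)
    ((List.range (xs.length + 1)).map Int.ofNat)
  refine ⟨by rw [hlenf, hlen0], ?_⟩
  intro v w hv hw
  constructor
  · intro heq
    have hs0 : ∀ v v', v ∈ pvIds xs → v' ∈ pvIds xs →
        pvLabf ((List.range (xs.length + 1)).map Int.ofNat) v =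
        pvLabf ((List.range (xs.length + 1)).map Int.ofNat) v' →
        pvConn xs v v' := by
      intro v v' hv hv' heq0
      obtain ⟨h10, h1l⟩ := pv_id_bounds xs hv (xs.length + 1) rfl
      obtain ⟨h20, h2l⟩ := pv_id_bounds xs hv' (xs.length + 1) rfl
      rw [pv_labf_init xs.length v h10 (by push_cast at h1l ⊢; omega),
          pv_labf_init xs.length v' h20 (by push_cast at h2l ⊢; omega)] at heq0
      rw [heq0]
      exact Relation.ReflTransGen.refl
    exact pv_foldB_sound xs hpre (PySem.List.permutations xs 3) _
      (fun p hp => hp) hlen0 hs0 v w hv hw heq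
  · intro hconn
    induction hconn with
    | refl => rfl
    | tail hc hr ihz =>
        rename_i m z
        obtain ⟨a, b, c, hmp, hch, hxm, hxz⟩ := hr
        obtain ⟨f1, f2⟩ := pv_foldB_edges xs hpre (PySem.List.permutations xs 3) _
          (fun p hp => hp) hlen0 a b c hmp hch
        have hedge_eq : pvLabf ((PySem.List.permutations xs 3).foldl pvStepB
            ((List.range (xs.length + 1)).map Int.ofNat)) m =
            pvLabf ((PySem.List.permutations xs 3).foldl pvStepB
            ((List.range (xs.length + 1)).map Int.ofNat)) z := by
          rcases hxm with rfl | rfl | rfl <;> rcases hxz with rfl | rfl | rfl <;>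
            first
              | rfl
              | exact f1
              | exact f2
              | exact f1.symm
              | exact f2.symm
              | exact f1.symm.trans f2
              | exact f2.symm.trans f1
        exact (ihz (pvConn_mem xs hpre hc hv)).trans hedge_eq

-- ---- the final selection loops ----

def pvClass (xs : List (Int × String)) (L : List Int) (v : Int) : List Int :=
  (PySem.List.pyRange 1 ((xs.length : Int) + 1)).filter
    (fun w => PySem.List.pyGetD L w 0 = PySem.List.pyGetD L v 0)

theorem pv_sum_ones (L : List Int) (lv : Int) (l : List Int) :
    (l.map (fun w => if PySem.List.pyGetD L w 0 = lv then (1 : Int) else 0)).sum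
      = ((l.filter (fun w => PySem.List.pyGetD L w 0 = lv)).length : Int) := by
  induction l with
  | nil => simp
  | cons e t ih =>
      rw [List.map_cons, List.sum_cons, List.filter_cons, ih]
      by_cases h : PySem.List.pyGetD L e 0 = lv
      · simp [h]
        omega
      · simp [h]

theorem pv_final_fold (xs : List (Int × String)) (L : List Int)
    (related : PySem.Dict Int (PySem.Set Int))
    (hfam_nd : ∀ v ∈ pvIds xs, (pvGetFamily related v).Nodup)
    (hfam_mem : ∀ v ∈ pvIds xs, ∀ z : Int, z ∈ pvGetFamily related v ↔
      (z ∈ pvIds xs ∧ PySem.List.pyGetD L z 0 = PySem.List.pyGetD L v 0)) :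
    ∀ (rest pp : List Int), pvIds xs = pp ++ rest →
    ∀ (lenL : Int) (Lg C : PySem.Set Int) (s m : Int),
    lenL = s → Lg.sum = m →
    (∀ i ∈ pp, ((pvClass xs L i).length : Int) ≤ s) →
    (∀ w : Int, w ∈ C ↔ ∃ i ∈ pp, w ∈ pvIds xs ∧
      PySem.List.pyGetD L w 0 = PySem.List.pyGetD L i 0) →
    (rest.foldl (fun (st : Int × PySem.Set Int × PySem.Set Int) i =>
      if st.2.2.contains i then st
      else
        let checked := st.2.2.add i
        let fam := pvGetFamily related i
        let famLen : Int := PySem.Set.len fam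
        let checked2 := checked.update fam
        if famLen > st.1 then (famLen, fam, checked2) else (st.1, st.2.1, checked2))
      (lenL, Lg, C)).2.1.sum
    = (rest.foldl (fun (st : Int × Int) v =>
        let lv := PySem.List.pyGetD L v 0
        let sz : Int := ((PySem.List.pyRange 1 ((xs.length : Int) + 1)).map
          (fun w => if PySem.List.pyGetD L w 0 = lv then (1 : Int) else 0)).sum
        if sz > st.1 then
          (sz, ((PySem.List.pyRange 1 ((xs.length : Int) + 1)).filter
            (fun w => PySem.List.pyGetD L w 0 = lv)).sum)
        else st) (s, m)).2 := by
  intro rest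
  induction rest with
  | nil =>
      intro pp hsplit lenL Lg C s m h1 h2 _ _
      simpa using h2
  | cons v rest' ih =>
      intro pp hsplit lenL Lg C s m hls hsum hsz hchk
      have hvids : v ∈ pvIds xs := by
        rw [hsplit]; exact List.mem_append.mpr (Or.inr List.mem_cons_self)
      have hsplit' : pvIds xs = (pp ++ [v]) ++ rest' := by rw [hsplit]; simp
      rw [List.foldl_cons, List.foldl_cons]
      have hsz_eq : ((PySem.List.pyRange 1 ((xs.length : Int) + 1)).map
          (fun w => if PySem.List.pyGetD L w 0 = PySem.List.pyGetD L v 0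
            then (1 : Int) else 0)).sum
          = ((pvClass xs L v).length : Int) := pv_sum_ones L _ _
      by_cases hc : C.contains v = true
      · -- A skips v; B re-scores an already seen class, the strict > fails
        obtain ⟨i0, hi0pp, -, heq0⟩ := (hchk v).mp ((PySem.Set.contains_iff _ _).mp hc)
        have hclass_eq : pvClass xs L v = pvClass xs L i0 := by
          unfold pvClass; rw [heq0]
        have hsz_le : ((pvClass xs L v).length : Int) ≤ s := by
          rw [hclass_eq]; exact hsz i0 hi0pp
        have hstepA : (if (lenL, Lg, C).2.2.contains v = true then (lenL, Lg, C)
            else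
              let checked := (lenL, Lg, C).2.2.add v
              let fam := pvGetFamily related v
              let famLen := PySem.Set.len fam
              let checked2 := checked.update fam
              if famLen > (lenL, Lg, C).1 then (famLen, fam, checked2)
              else ((lenL, Lg, C).1, (lenL, Lg, C).2.1, checked2)) = (lenL, Lg, C) := by
          simp only []
          rw [if_pos hc]
        have hstepB : (let lv := PySem.List.pyGetD L v 0
            let sz : Int := ((PySem.List.pyRange 1 ((xs.length : Int) + 1)).map
              (fun w => if PySem.List.pyGetD L w 0 = lv then (1 : Int) else 0)).sum
            if sz > (s, m).1 then
              (sz, ((PySem.List.pyRange 1 ((xs.length : Int) + 1)).filter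
                (fun w => PySem.List.pyGetD L w 0 = lv)).sum)
            else (s, m)) = (s, m) := by
          simp only []
          rw [hsz_eq, if_neg (by omega)]
        rw [hstepA, hstepB]
        refine ih (pp ++ [v]) hsplit' lenL Lg C s m hls hsum ?_ ?_
        · intro i hi
          rcases List.mem_append.mp hi with h | h
          · exact hsz i h
          · rcases List.mem_singleton.mp h with rfl
            exact hsz_le
        · intro w
          rw [hchk]
          constructor
          · rintro ⟨i, hipp, hw⟩
            exact ⟨i, List.mem_append.mpr (Or.inl hipp), hw⟩
          · rintro ⟨i, hipp, hwids, hweq⟩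
            rcases List.mem_append.mp hipp with h | h
            · exact ⟨i, h, hwids, hweq⟩
            · rcases List.mem_singleton.mp h with rfl
              exact ⟨i0, hi0pp, hwids, hweq.trans heq0⟩
      · -- A explores the family of v
        have hvC : v ∉ C := fun hm => hc ((PySem.Set.contains_iff _ _).mpr hm)
        have hclass_nodup : (pvClass xs L v).Nodup := (nodup_pvIds xs).filter _
        have hfam_perm : (pvGetFamily related v).Perm (pvClass xs L v) := by
          rw [List.perm_ext_iff_of_nodup (hfam_nd v hvids) hclass_nodup]
          intro z
          rw [hfam_mem v hvids z]
          unfold pvClass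
          rw [List.mem_filter]
          constructor
          · rintro ⟨hz, heq⟩
            exact ⟨hz, by simpa using heq⟩
          · rintro ⟨hz, heq⟩
            exact ⟨hz, by simpa using heq⟩
        have hlen_eq : PySem.Set.len (pvGetFamily related v) = ((pvClass xs L v).length : Int) := by
          rw [show PySem.Set.len (pvGetFamily related v)
            = ((pvGetFamily related v).length : Int) from rfl, hfam_perm.length_eq]
        have hsum_fam : (pvGetFamily related v).sum = (pvClass xs L v).sum := hfam_perm.sum_eq
        have hchk2 : ∀ w : Int, w ∈ (C.add v).update (pvGetFamily related v) ↔
            ∃ i ∈ pp ++ [v], w ∈ pvIds xs ∧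
              PySem.List.pyGetD L w 0 = PySem.List.pyGetD L i 0 := by
          intro w
          rw [PySem.Set.mem_update, PySem.Set.mem_add, hfam_mem v hvids w, hchk]
          constructor
          · rintro ((⟨i, hipp, hw⟩ | rfl) | ⟨hwids, hweq⟩)
            · exact ⟨i, List.mem_append.mpr (Or.inl hipp), hw⟩
            · exact ⟨w, List.mem_append.mpr (Or.inr List.mem_cons_self), hvids, rfl⟩
            · exact ⟨v, List.mem_append.mpr (Or.inr List.mem_cons_self), hwids, hweq⟩
          · rintro ⟨i, hipp, hwids, hweq⟩
            rcases List.mem_append.mp hipp with h | h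
            · exact Or.inl (Or.inl ⟨i, h, hwids, hweq⟩)
            · rcases List.mem_singleton.mp h with rfl
              exact Or.inr ⟨hwids, hweq⟩
        by_cases hgt : ((pvClass xs L v).length : Int) > s
        · have hstepA : (if (lenL, Lg, C).2.2.contains v = true then (lenL, Lg, C)
              else
                let checked := (lenL, Lg, C).2.2.add v
                let fam := pvGetFamily related v
                let famLen := PySem.Set.len fam
                let checked2 := checked.update fam
                if famLen > (lenL, Lg, C).1 then (famLen, fam, checked2)
                else ((lenL, Lg, C).1, (lenL, Lg, C).2.1, checked2)) = (((pvClass xs L v).length : Int), pvGetFamily related v,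
                (C.add v).update (pvGetFamily related v)) := by
            simp only []
            rw [if_neg hc, hlen_eq, if_pos (by omega : ((pvClass xs L v).length : Int) > lenL)]
          have hstepB : (let lv := PySem.List.pyGetD L v 0
              let sz : Int := ((PySem.List.pyRange 1 ((xs.length : Int) + 1)).map
                (fun w => if PySem.List.pyGetD L w 0 = lv then (1 : Int) else 0)).sum
              if sz > (s, m).1 then
                (sz, ((PySem.List.pyRange 1 ((xs.length : Int) + 1)).filter
                  (fun w => PySem.List.pyGetD L w 0 = lv)).sum)
              else (s, m)) = (((pvClass xs L v).length : Int), (pvClass xs L v).sum) := by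
            simp only []
            rw [hsz_eq, if_pos (by omega)]
            rfl
          rw [hstepA, hstepB]
          refine ih (pp ++ [v]) hsplit' _ _ _ _ _ rfl hsum_fam ?_ hchk2
          intro i hi
          rcases List.mem_append.mp hi with h | h
          · have := hsz i h
            omega
          · rcases List.mem_singleton.mp h with rfl
            omega
        · have hstepA : (if (lenL, Lg, C).2.2.contains v = true then (lenL, Lg, C)
              else
                let checked := (lenL, Lg, C).2.2.add v
                let fam := pvGetFamily related v
                let famLen := PySem.Set.len fam
                let checked2 := checked.update fam
                if famLen > (lenL, Lg, C).1 then (famLen, fam, checked2)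
                else ((lenL, Lg, C).1, (lenL, Lg, C).2.1, checked2)) = (lenL, Lg, (C.add v).update (pvGetFamily related v)) := by
            simp only []
            rw [if_neg hc, hlen_eq, if_neg (by omega : ¬ ((pvClass xs L v).length : Int) > lenL)]
          have hstepB : (let lv := PySem.List.pyGetD L v 0
              let sz : Int := ((PySem.List.pyRange 1 ((xs.length : Int) + 1)).map
                (fun w => if PySem.List.pyGetD L w 0 = lv then (1 : Int) else 0)).sum
              if sz > (s, m).1 then
                (sz, ((PySem.List.pyRange 1 ((xs.length : Int) + 1)).filter
                  (fun w => PySem.List.pyGetD L w 0 = lv)).sum)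
              else (s, m)) = (s, m) := by
            simp only []
            rw [hsz_eq, if_neg (by omega)]
          rw [hstepA, hstepB]
          refine ih (pp ++ [v]) hsplit' lenL Lg _ s m hls hsum ?_ hchk2
          intro i hi
          rcases List.mem_append.mp hi with h | h
          · exact hsz i h
          · rcases List.mem_singleton.mp h with rfl
            omega


-- assembling everything
theorem pv_main (xs : List (Int × String)) (hpre : Pre_solve_part3 xs) :
    solve_part3 xs = solve_part3_alt xs := by
  obtain ⟨hkeys, hnds, hmems⟩ := pv_related_char xs hpre
  obtain ⟨hLlen, hLchar⟩ := pv_label_char xs hpre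
  have hsize := pv_size_of_keys _ xs hkeys
  have hfam := fun v (hv : v ∈ pvIds xs) =>
    pv_getFamily_char xs hpre _ hmems hnds hsize v hv
  have hfam_nd : ∀ v ∈ pvIds xs,
      (pvGetFamily ((PySem.List.permutations xs 3).foldl pvStepA
        ((PySem.List.pyRange 1 ((xs.length : Int) + 1)).foldl
          (fun d i => d.insert i (PySem.Set.ofList [i])) PySem.Dict.empty)) v).Nodup :=
    fun v hv => (hfam v hv).1
  have hfam_mem : ∀ v ∈ pvIds xs, ∀ z : Int,
      z ∈ pvGetFamily ((PySem.List.permutations xs 3).foldl pvStepA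
        ((PySem.List.pyRange 1 ((xs.length : Int) + 1)).foldl
          (fun d i => d.insert i (PySem.Set.ofList [i])) PySem.Dict.empty)) v ↔
      (z ∈ pvIds xs ∧
        PySem.List.pyGetD ((PySem.List.permutations xs 3).foldl pvStepB
          ((List.range (xs.length + 1)).map Int.ofNat)) z 0 =
        PySem.List.pyGetD ((PySem.List.permutations xs 3).foldl pvStepB
          ((List.range (xs.length + 1)).map Int.ofNat)) v 0) := by
    intro v hv z
    rw [(hfam v hv).2 z]
    constructor
    · intro hconn
      have hz : z ∈ pvIds xs := pvConn_mem xs hpre hconn hv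
      exact ⟨hz, ((hLchar v z hv hz).mpr hconn).symm⟩
    · rintro ⟨hz, heq⟩
      exact (hLchar v z hv hz).mp heq.symm
  have hres := pv_final_fold xs
    ((PySem.List.permutations xs 3).foldl pvStepB ((List.range (xs.length + 1)).map Int.ofNat))
    ((PySem.List.permutations xs 3).foldl pvStepA
      ((PySem.List.pyRange 1 ((xs.length : Int) + 1)).foldl
        (fun d i => d.insert i (PySem.Set.ofList [i])) PySem.Dict.empty))
    hfam_nd hfam_mem (pvIds xs) [] (List.nil_append _).symm
    0 PySem.Set.empty PySem.Set.empty 0 0 rfl rfl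
    (fun i hi => absurd hi (List.not_mem_nil))
    (fun w => ⟨fun h => absurd h (List.not_mem_nil),
      fun ⟨i, hi, _⟩ => absurd hi (List.not_mem_nil)⟩)
  exact hres

-- ===== VERDICT (by name: the statement is the Claim_ definition above) =====
theorem solve_part3_spec : Claim_equal_solve_part3 := by
  intro xs _ hpre
  unfold Spec_solve_part3
  exact pv_main xs hpre
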